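-- pv_equiv track=rewrite | github.com/ningyuan-xie/leetcode | 01-Easy/02395-Find-Subarrays-With-Equal-Sum.py | findSubarrays
-- ===== SOURCE A (Python) =====
-- from typing import List
--
-- def findSubarrays(nums: List[int]) -> bool:
--     """Optimal Solution: Set. Time Complexity: O(n), Space Complexity: O(n)"""
--     seen = set()
--     # Iterate through the array and check if the sum of two consecutive elements is already seen
--     for i in range(len(nums) - 1):
--         subarray_sum = nums[i] + nums[i + 1]
--         if subarray_sum in seen:
--             return True
--         seen.add(subarray_sum)
--     return False
-- ===== SOURCE B (Python) =====
-- def findSubarrays(nums):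
--     sums = sorted(a + b for a, b in zip(nums, nums[1:]))
--     for i in range(len(sums) - 1):
--         if sums[i] == sums[i + 1]:
--             return True
--     return False
-- ===== Notes on version B (the rewrite author's own statement) =====
-- stated objective: alternative
-- what changed: Replaces A's single-pass hash-set duplicate scan with early return by a sort-based algorithm: build all adjacent-pair sums, sort them, and detect a duplicate as two equal neighbours in the sorted list.
import Mathlib
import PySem

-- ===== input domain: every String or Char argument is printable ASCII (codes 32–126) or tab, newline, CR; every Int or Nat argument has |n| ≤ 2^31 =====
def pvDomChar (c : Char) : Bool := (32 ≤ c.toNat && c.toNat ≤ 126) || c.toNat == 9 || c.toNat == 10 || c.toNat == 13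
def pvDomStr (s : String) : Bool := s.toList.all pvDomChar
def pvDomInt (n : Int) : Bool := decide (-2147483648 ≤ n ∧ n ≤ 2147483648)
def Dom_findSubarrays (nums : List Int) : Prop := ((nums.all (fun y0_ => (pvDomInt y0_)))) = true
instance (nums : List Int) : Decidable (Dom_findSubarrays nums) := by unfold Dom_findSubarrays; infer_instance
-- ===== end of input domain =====

-- B replaces A's incremental seen-set scan with early return by a sort-based algorithm:
-- build all adjacent-pair sums, sort them, and look for two equal neighbours (objective: alternative).

-- ===== PORT A =====
-- A's loop over i in range(len(nums)-1): each step reads nums[i], nums[i+1]; ported as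
-- structural recursion over the successive adjacent pairs, carrying the seen set, with early return.
def findSubarraysLoop : List Int → PySem.Set Int → Bool
  | x :: y :: rest, seen =>
      if PySem.Set.contains seen (x + y) then true
      else findSubarraysLoop (y :: rest) (PySem.Set.add seen (x + y))
  | _, _ => false

def findSubarrays (nums : List Int) : Bool :=
  findSubarraysLoop nums PySem.Set.empty

-- ===== PORT B =====
-- B's scan 'for i in range(len(sums)-1): if sums[i] == sums[i+1]' over the sorted list,
-- ported as structural recursion over successive neighbour pairs.
def hasAdjEq : List Int → Bool
  | x :: y :: rest => x == y || hasAdjEq (y :: rest)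
  | _ => false

def findSubarrays_alt (nums : List Int) : Bool :=
  let sums := PySem.List.sorted ((nums.zip (nums.drop 1)).map (fun p => p.1 + p.2)) (fun x => x) false
  hasAdjEq sums

-- ===== PRECONDITION & SPEC =====
def Spec_findSubarrays (nums : List Int) (out : Bool) : Prop := out = findSubarrays_alt nums
instance (nums : List Int) (out : Bool) : Decidable (Spec_findSubarrays nums out) := by unfold Spec_findSubarrays; infer_instance

-- ===== CLAIM (what is proved, stated in full; the proofs are below) =====
def Claim_equal_findSubarrays : Prop := ∀ (nums : List Int), Dom_findSubarrays nums → Spec_findSubarrays nums (findSubarrays nums)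

-- ===== LEMMAS AND PROOFS =====

-- the list of adjacent-pair sums, in A's traversal order
def pairSums : List Int → List Int
  | x :: y :: rest => (x + y) :: pairSums (y :: rest)
  | _ => []

lemma zip_map_eq_pairSums : ∀ (nums : List Int),
    (nums.zip (nums.drop 1)).map (fun p => p.1 + p.2) = pairSums nums
  | [] => rfl
  | [_] => rfl
  | x :: y :: rest => by
      simpa [pairSums, List.zip] using zip_map_eq_pairSums (y :: rest)

-- A's loop returns true iff some sum is repeated: characterisation as Nodup of seen ++ pairSums
lemma findSubarraysLoop_eq : ∀ (l : List Int) (seen : PySem.Set Int), seen.Nodup →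
    findSubarraysLoop l seen = decide ¬ (seen ++ pairSums l).Nodup
  | [], seen, hs => by simp [findSubarraysLoop, pairSums, hs]
  | [_], seen, hs => by simp [findSubarraysLoop, pairSums, hs]
  | x :: y :: rest, seen, hs => by
      rw [findSubarraysLoop]
      by_cases hmem : (x + y) ∈ seen
      · rw [if_pos ((PySem.Set.contains_iff seen (x+y)).mpr hmem)]
        have : ¬ (seen ++ pairSums (x :: y :: rest)).Nodup := by
          intro hnd
          exact (List.disjoint_of_nodup_append hnd) hmem (by simp [pairSums])
        simp [this]
      · rw [if_neg (fun hc => hmem ((PySem.Set.contains_iff seen (x+y)).mp hc))]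
        rw [findSubarraysLoop_eq (y :: rest) _ (PySem.Set.nodup_add seen (x+y) hs),
            PySem.Set.add_of_not_mem hmem]
        simp [pairSums, List.append_assoc]

-- on a (≤)-sorted list, no equal neighbours is the same as Nodup
lemma hasAdjEq_sorted_iff : ∀ (s : List Int), s.Pairwise (· ≤ ·) →
    (hasAdjEq s = false ↔ s.Nodup)
  | [], _ => by simp [hasAdjEq]
  | [_], _ => by simp [hasAdjEq]
  | x :: y :: rest, hp => by
      have htail : (y :: rest).Pairwise (· ≤ ·) := (List.pairwise_cons.mp hp).2
      have hxy : x ≤ y := (List.pairwise_cons.mp hp).1 y (by simp)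
      have hyrest : ∀ z ∈ rest, y ≤ z :=
        fun z hz => (List.pairwise_cons.mp htail).1 z hz
      rw [hasAdjEq]
      constructor
      · intro h
        have h1 : x ≠ y := by
          intro he; simp [he] at h
        have h2 : hasAdjEq (y :: rest) = false := by
          rcases Bool.or_eq_false_iff.mp h with ⟨_, h2⟩; exact h2
      -- from x < y and y ≤ rest, x is not in the tail
        have hlt : x < y := lt_of_le_of_ne hxy h1
        refine List.nodup_cons.mpr ⟨?_, (hasAdjEq_sorted_iff (y :: rest) htail).mp h2⟩
        intro hmem
        rcases List.mem_cons.mp hmem with he | hz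
        · exact h1 he
        · exact absurd (lt_of_lt_of_le hlt (hyrest x hz)) (lt_irrefl x)
      · intro hnd
        have h1 : x ≠ y := by
          intro he
          exact (List.nodup_cons.mp hnd).1 (he ▸ List.mem_cons_self)
        have h2 := (hasAdjEq_sorted_iff (y :: rest) htail).mpr (List.nodup_cons.mp hnd).2
        simp [h1, h2]

-- ===== VERDICT (by name: the statement is the Claim_ definition above) =====
theorem findSubarrays_spec : Claim_equal_findSubarrays := by
  intro nums _
  unfold Spec_findSubarrays findSubarrays findSubarrays_alt
  rw [zip_map_eq_pairSums,
      findSubarraysLoop_eq nums PySem.Set.empty List.nodup_nil]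
  simp only [PySem.Set.empty, List.nil_append]
  have hperm : (PySem.List.sorted (pairSums nums) (fun x => x) false).Perm (pairSums nums) :=
    PySem.List.sorted_perm _ _ _
  have hsorted : (PySem.List.sorted (pairSums nums) (fun x => x) false).Pairwise (· ≤ ·) := by
    simpa using PySem.List.sorted_pairwise (xs := pairSums nums) (key := fun x => x)
  have hiff := hasAdjEq_sorted_iff _ hsorted
  rw [hperm.nodup_iff] at hiff
  cases hcase : hasAdjEq (PySem.List.sorted (pairSums nums) (fun x => x) false) with
  | false => simp [hiff.mp hcase]
  | true =>
      have : ¬ (pairSums nums).Nodup := fun hnd => by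
        rw [hiff.mpr hnd] at hcase; exact Bool.false_ne_true hcase
      simp [this]
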